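-- pv_equiv track=rewrite | github.com/MrBrantCode/unitest_baseline | mut_generate/mist_train_taco/taco_16871/solution.py | calculate_max_fun_factor
-- ===== SOURCE A (Python) =====
-- def calculate_max_fun_factor(n, d, m, a):
--     less = []
--     more = []
--
--     # Separate the fun factors into two lists based on whether they are greater than m
--     for i in a:
--         if i > m:
--             more.append(i)
--         else:
--             less.append(i)
--
--     # Sort both lists in descending order
--     less.sort(reverse=True)
--     more.sort(reverse=True)
--
--     # Create prefix sums for the less and more lists
--     lessp = []
--     if len(less) > 0:
--         lessp = [less[0]]
--         for i in less[1:]: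
--             lessp.append(lessp[-1] + i)
--
--     morep = []
--     if len(more) > 0:
--         morep = [more[0]]
--         for i in more[1:]:
--             morep.append(morep[-1] + i)
--
--     ans = 0
--
--     # Calculate the maximum total fun factor
--     for i in range(-1, len(more)):
--         high = 0
--         if len(morep) > 0 and i >= 0:
--             high = morep[i]
--         if i * (d + 1) + 1 > n:
--             break
--         sec = n - i * (d + 1) - 1
--         if i + 1 == 0:
--             sec = n
--             high = 0
--         if sec > len(lessp):
--             sec = len(lessp)
--         low = 0
--         if len(lessp) > 0 and sec > 0:
--             low = lessp[sec - 1]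
--         ans = max(ans, high + low)
--
--     return ans
-- ===== SOURCE B (Python) =====
-- def calculate_max_fun_factor(n, d, m, a):
--     # Closed-form bound on the number of big days, then direct slice sums per
--     # candidate count -- no prefix arrays, no break, no running state.
--     less = sorted((x for x in a if x <= m), reverse=True)
--     more = sorted((x for x in a if x > m), reverse=True)
--     kmax = min(len(more), (n - 1) // (d + 1) + 1)
--     cands = [0]
--     for k in range(kmax + 1):
--         free = n if k == 0 else n - (k - 1) * (d + 1) - 1
--         cands.append(sum(more[:k]) + sum(less[:max(free, 0)]))
--     return max(cands)
-- ===== Notes on version B (the rewrite author's own statement) =====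
-- stated objective: simpler
-- what changed: Replaces A's prefix-sum arrays and break-driven loop by a closed-form bound kmax = min(len(more), (n-1)//(d+1)+1) and direct slice sums per candidate count, taking max over the candidate list; Pre_ restricts to the natural domain 0 <= d (d is a count of muddy days), outside which A's loop-entry break yields accidental values and B's closed-form bound divides by d+1.
-- outside the precondition, e.g. on calculate_max_fun_factor(3, -1, 0, [1]): A returns 1, B raises ZeroDivisionError; on calculate_max_fun_factor(-2, -6, 3, [-2, 6, 0, 2]): A returns 0, B returns 6
import Mathlib
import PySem

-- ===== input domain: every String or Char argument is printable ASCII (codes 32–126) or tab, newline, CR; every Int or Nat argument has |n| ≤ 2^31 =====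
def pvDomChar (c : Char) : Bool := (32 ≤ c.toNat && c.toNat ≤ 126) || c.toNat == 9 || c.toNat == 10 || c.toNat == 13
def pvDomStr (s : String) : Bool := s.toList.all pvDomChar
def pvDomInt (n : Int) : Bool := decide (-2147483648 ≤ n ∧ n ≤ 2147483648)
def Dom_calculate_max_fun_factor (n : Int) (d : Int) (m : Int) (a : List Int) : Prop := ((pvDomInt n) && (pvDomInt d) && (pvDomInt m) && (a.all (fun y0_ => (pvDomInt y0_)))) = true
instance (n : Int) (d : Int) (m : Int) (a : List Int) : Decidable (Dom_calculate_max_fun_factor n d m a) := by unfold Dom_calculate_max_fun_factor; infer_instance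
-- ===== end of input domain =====

-- B drops A's prefix-sum arrays and break-driven loop for a closed-form bound on the
-- number of big days plus direct slice sums per candidate (simpler; not faster).

-- ===== PORT A =====
-- prefix-sum builder: 'out = [s[0]]; for i in s[1:]: out.append(out[-1] + i)'
def pvPrefix (s : List Int) : List Int :=
  match s with
  | [] => []
  | x :: rest => rest.foldl (fun acc i => acc ++ [PySem.List.pyGetD acc (-1) 0 + i]) [x]

-- the 'for i in range(-1, len(more))' loop with its break
def pvALoop (n d : Int) (lessp morep : List Int) : List Int → Int → Int
  | [], ans => ans
  | i :: rest, ans =>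
    let high0 : Int := if 0 < morep.length ∧ 0 ≤ i then PySem.List.pyGetD morep i 0 else 0
    if n < i * (d + 1) + 1 then ans
    else
      let sec0 := n - i * (d + 1) - 1
      let sec1 := if i + 1 = 0 then n else sec0
      let high := if i + 1 = 0 then 0 else high0
      let sec := if (lessp.length : Int) < sec1 then (lessp.length : Int) else sec1
      let low : Int := if 0 < lessp.length ∧ 0 < sec then PySem.List.pyGetD lessp (sec - 1) 0 else 0
      pvALoop n d lessp morep rest (max ans (high + low))

def calculate_max_fun_factor (n : Int) (d : Int) (m : Int) (a : List Int) : Int :=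
  let lm := a.foldl (fun (lm : List Int × List Int) i =>
      if m < i then (lm.1, lm.2 ++ [i]) else (lm.1 ++ [i], lm.2)) ([], [])
  let less := PySem.List.sorted lm.1 (fun x => x) true
  let more := PySem.List.sorted lm.2 (fun x => x) true
  let lessp := pvPrefix less
  let morep := pvPrefix more
  pvALoop n d lessp morep (PySem.List.pyRange (-1) (more.length : Int) 1) 0

-- ===== PORT B =====
def calculate_max_fun_factor_alt (n : Int) (d : Int) (m : Int) (a : List Int) : Int :=
  let less := PySem.List.sorted (a.filter (fun x => decide (x ≤ m))) (fun x => x) true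
  let more := PySem.List.sorted (a.filter (fun x => decide (m < x))) (fun x => x) true
  let kmax : Int := min (more.length : Int) (PySem.Int.floordiv (n - 1) (d + 1) + 1)
  let cands := (PySem.List.pyRange 0 (kmax + 1) 1).foldl
      (fun acc k =>
        let free : Int := if k = 0 then n else n - (k - 1) * (d + 1) - 1
        acc ++ [(PySem.List.slice more none (some k)).sum
                 + (PySem.List.slice less none (some (max free 0))).sum])
      [0]
  (PySem.List.max? cands (fun y => y)).getD 0

-- ===== PRECONDITION & SPEC =====
-- d is a count of muddy days, so the natural domain is 0 ≤ d; Pre_ excludes negative d,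
-- where A's loop-entry break yields accidental values and B's closed-form bound divides by d+1.
def Pre_calculate_max_fun_factor (n : Int) (d : Int) (m : Int) (a : List Int) : Prop := 0 ≤ d
instance (n : Int) (d : Int) (m : Int) (a : List Int) : Decidable (Pre_calculate_max_fun_factor n d m a) := by unfold Pre_calculate_max_fun_factor; infer_instance
def pvWitness_calculate_max_fun_factor : Int × Int × Int × List Int := (5, 1, 3, [1, 2, 4, 5, 3])

def Spec_calculate_max_fun_factor (n : Int) (d : Int) (m : Int) (a : List Int) (out : Int) : Prop := out = calculate_max_fun_factor_alt n d m a
instance (n : Int) (d : Int) (m : Int) (a : List Int) (out : Int) : Decidable (Spec_calculate_max_fun_factor n d m a out) := by unfold Spec_calculate_max_fun_factor; infer_instance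

-- ===== CLAIM (what is proved, stated in full; the proofs are below) =====
def Claim_equal_calculate_max_fun_factor : Prop := ∀ (n : Int) (d : Int) (m : Int) (a : List Int), Dom_calculate_max_fun_factor n d m a → Pre_calculate_max_fun_factor n d m a → Spec_calculate_max_fun_factor n d m a (calculate_max_fun_factor n d m a)

-- ===== LEMMAS AND PROOFS =====

-- the per-index candidate value both loops maximise
def pvT (n step : Int) (L : Nat) (i : Int) : Nat :=
  (max 0 (min (if i < 0 then n else n - i * step - 1) (L : Int))).toNat

def pvCand (n step : Int) (less more : List Int) (i : Int) : Int :=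
  (more.take (i + 1).toNat).sum + (less.take (pvT n step less.length i)).sum

def pvTop (n step : Int) (M : Nat) : Int :=
  if 0 < step then min ((M : Int) - 1) (PySem.Int.floordiv (n - 1) step)
  else if 1 - step ≤ n then (M : Int) - 1 else -2

def pvPsums (c : Int) : List Int → List Int
  | [] => []
  | y :: r => (c + y) :: pvPsums (c + y) r

lemma pv_length_pvPsums (c : Int) (s : List Int) : (pvPsums c s).length = s.length := by
  induction s generalizing c with
  | nil => simp [pvPsums]
  | cons y r ih => simp [pvPsums, ih]

lemma pv_pvPsums_getD (s : List Int) (c : Int) (k : Nat) (h : k < s.length) :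
    (pvPsums c s).getD k 0 = c + (s.take (k + 1)).sum := by
  induction s generalizing c k with
  | nil => simp at h
  | cons y r ih =>
    cases k with
    | zero => simp [pvPsums]
    | succ k =>
      simp only [pvPsums, List.getD_cons_succ]
      rw [ih (c + y) k (by simpa using h)]
      simp [List.take_succ_cons]
      ring

lemma pv_pvPrefix_cons (x : Int) (r : List Int) : pvPrefix (x :: r) = x :: pvPsums x r := by
  have key : ∀ (r pre : List Int) (c : Int),
      r.foldl (fun acc i => acc ++ [PySem.List.pyGetD acc (-1) 0 + i]) (pre ++ [c])
        = (pre ++ [c]) ++ pvPsums c r := by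
    intro r
    induction r with
    | nil => intro pre c; simp [pvPsums]
    | cons y r ih =>
      intro pre c
      simp only [List.foldl_cons, PySem.List.pyGetD_neg_one_append_singleton]
      have := ih (pre ++ [c]) (c + y)
      simp only [List.append_assoc] at this ⊢
      rw [this]
      simp [pvPsums]
  have := key r [] x
  simpa [pvPrefix] using this

lemma pv_length_pvPrefix (s : List Int) : (pvPrefix s).length = s.length := by
  cases s with
  | nil => simp [pvPrefix]
  | cons x r => simp [pv_pvPrefix_cons, pv_length_pvPsums]

lemma pv_pvPrefix_getD (s : List Int) (k : Nat) (h : k < s.length) :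
    (pvPrefix s).getD k 0 = (s.take (k + 1)).sum := by
  cases s with
  | nil => simp at h
  | cons x r =>
    rw [pv_pvPrefix_cons]
    cases k with
    | zero => simp
    | succ k =>
      simp only [List.getD_cons_succ]
      rw [pv_pvPsums_getD r x k (by simpa using h)]
      simp [List.take_succ_cons]

lemma pv_partition (m : Int) (l acc1 acc2 : List Int) :
    l.foldl (fun (lm : List Int × List Int) i =>
        if m < i then (lm.1, lm.2 ++ [i]) else (lm.1 ++ [i], lm.2)) (acc1, acc2)
      = (acc1 ++ l.filter (fun i => decide (i ≤ m)), acc2 ++ l.filter (fun i => decide (m < i))) := by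
  induction l generalizing acc1 acc2 with
  | nil => simp
  | cons x l ih =>
    by_cases h : m < x
    · have h1 : decide (x ≤ m) = false := by simp [not_le.2 h]
      have h2 : decide (m < x) = true := by simp [h]
      simp only [List.foldl_cons, if_pos h, ih, List.filter_cons, h1, h2]
      simp
    · have h1 : decide (x ≤ m) = true := by
        have : x ≤ m := by omega
        simp [this]
      have h2 : decide (m < x) = false := by simp [h]
      simp only [List.foldl_cons, if_neg h, ih, List.filter_cons, h1, h2]
      simp

lemma pv_range_nil (a b : Int) (h : b ≤ a) : PySem.List.pyRange a b 1 = [] := by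
  rw [PySem.List.pyRange_one]
  have : (b - a).toNat = 0 := by omega
  simp [this]

lemma pv_top_le (n step : Int) (M : Nat) : pvTop n step M ≤ (M : Int) - 1 := by
  unfold pvTop
  split_ifs with h1 h2
  · exact min_le_left _ _
  · omega
  · omega

lemma pv_nb_iff (n step : Int) (M : Nat) (lo : Int) (h1 : -1 ≤ lo) (h2 : lo < (M : Int))
    (hreach : ∀ j : Int, -1 ≤ j → j < lo → j * step + 1 ≤ n) :
    (lo * step + 1 ≤ n) ↔ lo ≤ pvTop n step M := by
  unfold pvTop
  split_ifs with hs hn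
  · rw [le_min_iff, PySem.Int.le_floordiv_iff_mul_le hs]
    omega
  · have hmul : lo * step ≤ (-1) * step :=
      mul_le_mul_of_nonpos_right h1 (by omega)
    constructor
    · intro _; omega
    · intro _; omega
  · constructor
    · intro hc
      by_cases hlo : lo = -1
      · subst hlo; omega
      · have := hreach (-1) (by omega) (by omega)
        omega
    · intro hc; omega

lemma pv_high_eq (more : List Int) (i : Int) (h0 : 0 ≤ i) (h2 : i < (more.length : Int)) :
    (if 0 < (pvPrefix more).length ∧ 0 ≤ i then PySem.List.pyGetD (pvPrefix more) i 0 else 0)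
      = (more.take (i + 1).toNat).sum := by
  have hm : 0 < more.length := by
    have : (0 : Int) < (more.length : Int) := lt_of_le_of_lt h0 h2
    exact_mod_cast this
  rw [if_pos ⟨by rw [pv_length_pvPrefix]; exact hm, h0⟩]
  have hlen : i < ((pvPrefix more).length : Int) := by rw [pv_length_pvPrefix]; exact h2
  rw [PySem.List.pyGetD_eq_getElem _ _ h0 hlen]
  have hnk : i.toNat < (pvPrefix more).length := by
    rw [pv_length_pvPrefix]; omega
  rw [← List.getD_eq_getElem (pvPrefix more) 0 hnk]
  rw [pv_pvPrefix_getD more i.toNat (by rw [pv_length_pvPrefix] at hnk; exact hnk)]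
  have : (i + 1).toNat = i.toNat + 1 := by omega
  rw [this]

lemma pv_low_eq (less : List Int) (sec1 : Int) :
    (if 0 < (pvPrefix less).length ∧
        0 < (if ((pvPrefix less).length : Int) < sec1 then ((pvPrefix less).length : Int) else sec1)
      then PySem.List.pyGetD (pvPrefix less)
        ((if ((pvPrefix less).length : Int) < sec1 then ((pvPrefix less).length : Int) else sec1) - 1) 0
      else 0)
      = (less.take (max 0 (min sec1 (less.length : Int))).toNat).sum := by
  by_cases hL : less.length = 0
  · have hnil : less = [] := List.length_eq_zero_iff.mp hL
    subst hnil
    simp [pvPrefix]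
  · have hL' : 0 < less.length := Nat.pos_of_ne_zero hL
    have hlp : (pvPrefix less).length = less.length := pv_length_pvPrefix less
    have hsec : (if ((pvPrefix less).length : Int) < sec1 then ((pvPrefix less).length : Int) else sec1)
        = min sec1 (less.length : Int) := by
      rw [hlp, min_def]; split_ifs <;> omega
    rw [hsec]
    by_cases hpos : 0 < min sec1 (less.length : Int)
    · rw [if_pos ⟨by omega, hpos⟩]
      have hb1 : (0 : Int) ≤ min sec1 (less.length : Int) - 1 := by omega
      have hb2 : min sec1 (less.length : Int) - 1 < ((pvPrefix less).length : Int) := by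
        have := min_le_right sec1 (less.length : Int)
        omega
      rw [PySem.List.pyGetD_eq_getElem _ _ hb1 hb2]
      have hnk : (min sec1 (less.length : Int) - 1).toNat < (pvPrefix less).length := by
        have := min_le_right sec1 (less.length : Int)
        omega
      rw [← List.getD_eq_getElem (pvPrefix less) 0 hnk]
      rw [pv_pvPrefix_getD less _ (by rw [hlp] at hnk; exact hnk)]
      congr 2
      omega
    · rw [if_neg (by intro hcon; exact hpos hcon.2)]
      have h0 : (max 0 (min sec1 (less.length : Int))).toNat = 0 := by omega
      simp [h0]

lemma pv_body_eq (n d : Int) (less more : List Int) (i : Int) (h1 : -1 ≤ i) (h2 : i < (more.length : Int)) :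
    (if i + 1 = 0 then 0 else (if 0 < (pvPrefix more).length ∧ 0 ≤ i then PySem.List.pyGetD (pvPrefix more) i 0 else 0))
    + (if 0 < (pvPrefix less).length ∧
          0 < (if ((pvPrefix less).length : Int) < (if i + 1 = 0 then n else n - i * (d + 1) - 1) then ((pvPrefix less).length : Int) else (if i + 1 = 0 then n else n - i * (d + 1) - 1))
        then PySem.List.pyGetD (pvPrefix less)
          ((if ((pvPrefix less).length : Int) < (if i + 1 = 0 then n else n - i * (d + 1) - 1) then ((pvPrefix less).length : Int) else (if i + 1 = 0 then n else n - i * (d + 1) - 1)) - 1) 0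
        else 0)
    = pvCand n (d + 1) less more i := by
  rw [pv_low_eq less (if i + 1 = 0 then n else n - i * (d + 1) - 1)]
  unfold pvCand pvT
  have hif : (if i < 0 then n else n - i * (d + 1) - 1) = (if i + 1 = 0 then n else n - i * (d + 1) - 1) := by
    split_ifs <;> omega
  rw [hif]
  by_cases hi : i + 1 = 0
  · rw [if_pos hi]
    have h0 : (i + 1).toNat = 0 := by omega
    simp [h0]
  · rw [if_neg hi, pv_high_eq more i (by omega) h2]

lemma pv_aloop_eq (n d : Int) (less more : List Int) (fuel : Nat) :
    ∀ (lo ans : Int), -1 ≤ lo → fuel = ((more.length : Int) - lo).toNat →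
    (∀ j : Int, -1 ≤ j → j < lo → j * (d + 1) + 1 ≤ n) →
    pvALoop n d (pvPrefix less) (pvPrefix more) (PySem.List.pyRange lo (more.length : Int) 1) ans
      = (PySem.List.pyRange lo (pvTop n (d + 1) more.length + 1) 1).foldl
          (fun acc i => max acc (pvCand n (d + 1) less more i)) ans := by
  induction fuel with
  | zero =>
    intro lo ans h1 hf hreach
    have hM : (more.length : Int) ≤ lo := by omega
    rw [pv_range_nil lo _ hM, pv_range_nil lo _ (by have := pv_top_le n (d + 1) more.length; omega)]
    rfl
  | succ f ih =>
    intro lo ans h1 hf hreach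
    have hlt : lo < (more.length : Int) := by omega
    rw [PySem.List.pyRange_one_cons hlt]
    by_cases hb : n < lo * (d + 1) + 1
    · have hnot : ¬ lo ≤ pvTop n (d + 1) more.length := by
        rw [← pv_nb_iff n (d + 1) more.length lo h1 hlt hreach]
        omega
      rw [pv_range_nil lo (pvTop n (d + 1) more.length + 1) (by omega)]
      simp only [pvALoop, if_pos hb, List.foldl_nil]
    · have hle : lo ≤ pvTop n (d + 1) more.length := by
        rw [← pv_nb_iff n (d + 1) more.length lo h1 hlt hreach]
        omega
      rw [PySem.List.pyRange_one_cons (by omega : lo < pvTop n (d + 1) more.length + 1)]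
      simp only [pvALoop, if_neg hb, List.foldl_cons]
      have hX := pv_body_eq n d less more lo h1 hlt
      rw [hX]
      have hreach' : ∀ j : Int, -1 ≤ j → j < lo + 1 → j * (d + 1) + 1 ≤ n := by
        intro j hj1 hj2
        by_cases hj : j = lo
        · subst hj; omega
        · exact hreach j hj1 (by omega)
      exact ih (lo + 1) _ (by omega) (by omega) hreach'

-- B-side: a slice sum with only the lower clamp equals the fully clamped take
lemma pv_take_clamp (l : List Int) (x : Int) :
    l.take (max x 0).toNat = l.take (max 0 (min x (l.length : Int))).toNat := by
  rcases le_total x (l.length : Int) with h | h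
  · congr 1; omega
  · rw [List.take_of_length_le (by omega), List.take_of_length_le (by omega)]

-- B's candidate body equals pvCand at the shifted index
lemma pv_bcand_eq (n d : Int) (less more : List Int) (k : Int) (hk : 0 ≤ k) :
    (PySem.List.slice more none (some k)).sum
      + (PySem.List.slice less none (some (max (if k = 0 then n else n - (k - 1) * (d + 1) - 1) 0))).sum
    = pvCand n (d + 1) less more (k - 1) := by
  rw [PySem.List.slice_to more hk,
      PySem.List.slice_to less (le_max_right _ 0)]
  unfold pvCand pvT
  have h1 : (k - 1 + 1).toNat = k.toNat := by omega
  have h2 : (if (k - 1 : Int) < 0 then n else n - (k - 1) * (d + 1) - 1)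
      = (if k = 0 then n else n - (k - 1) * (d + 1) - 1) := by
    split_ifs <;> omega
  rw [h1, h2, pv_take_clamp less (if k = 0 then n else n - (k - 1) * (d + 1) - 1)]

-- B's whole computation equals the max-fold of pvCand over range(-1, pvTop + 1)
lemma pv_balt_eq (n d m : Int) (a : List Int) (hd : 0 ≤ d) :
    calculate_max_fun_factor_alt n d m a
      = (PySem.List.pyRange (-1)
            (pvTop n (d + 1) (PySem.List.sorted (a.filter (fun x => decide (m < x))) (fun x => x) true).length + 1) 1).foldl
          (fun acc i => max acc (pvCand n (d + 1)
            (PySem.List.sorted (a.filter (fun x => decide (x ≤ m))) (fun x => x) true)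
            (PySem.List.sorted (a.filter (fun x => decide (m < x))) (fun x => x) true) i)) 0 := by
  unfold calculate_max_fun_factor_alt
  set less := PySem.List.sorted (a.filter (fun x => decide (x ≤ m))) (fun x => x) true with hless
  set more := PySem.List.sorted (a.filter (fun x => decide (m < x))) (fun x => x) true with hmore
  have hkmax : min ((more.length : Int)) (PySem.Int.floordiv (n - 1) (d + 1) + 1)
      = pvTop n (d + 1) more.length + 1 := by
    unfold pvTop
    rw [if_pos (by omega : (0 : Int) < d + 1)]
    omega
  simp only [hkmax]
  rw [PySem.List.foldl_append_singleton_eq_map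
      (fun k => (PySem.List.slice more none (some k)).sum
        + (PySem.List.slice less none (some (max (if k = 0 then n else n - (k - 1) * (d + 1) - 1) 0))).sum)]
  rw [List.singleton_append, PySem.List.max?_id_cons, Option.getD_some, List.foldl_map]
  rw [PySem.List.pyRange_one 0 (pvTop n (d + 1) more.length + 1 + 1),
      PySem.List.pyRange_one (-1) (pvTop n (d + 1) more.length + 1)]
  have hN : (pvTop n (d + 1) more.length + 1 + 1 - 0).toNat
      = (pvTop n (d + 1) more.length + 1 - (-1)).toNat := by omega
  rw [hN, List.foldl_map, List.foldl_map]
  congr 1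
  funext acc j
  rw [pv_bcand_eq n d less more ((0 : Int) + (j : Int)) (by omega)]
  have : (0 : Int) + (j : Int) - 1 = -1 + (j : Int) := by omega
  rw [this]

-- ===== VERDICT (by name: the statement is the Claim_ definition above) =====
theorem calculate_max_fun_factor_spec : Claim_equal_calculate_max_fun_factor := by
  unfold Claim_equal_calculate_max_fun_factor
  intro n d m a _ hd
  unfold Spec_calculate_max_fun_factor calculate_max_fun_factor
  rw [pv_partition m a [] []]
  simp only [List.nil_append]
  have hA := pv_aloop_eq n d
      (PySem.List.sorted (a.filter (fun i => decide (i ≤ m))) (fun x => x) true)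
      (PySem.List.sorted (a.filter (fun i => decide (m < i))) (fun x => x) true)
      (((PySem.List.sorted (a.filter (fun i => decide (m < i))) (fun x => x) true).length : Int) - (-1)).toNat
      (-1) 0 (by omega) rfl (by intro j hj1 hj2; omega)
  rw [hA, pv_balt_eq n d m a hd]
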